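-- pv_equiv track=rewrite | github.com/RamboCambo/Coding-Interviews-Preparation-Practice | University Projects/2802ICT/Assignment 2 - Multiple Pathfinding Algorithms/main.py | convert_steps_to_path
-- ===== SOURCE A (Python) =====
-- def convert_steps_to_path(steps):
--     path = [(0, 0)]
--
--     for step in steps:
--         if step == "L":
--             path.append((path[-1][0], path[-1][1]-1))
--         elif step == "R":
--             path.append((path[-1][0], path[-1][1]+1))
--         elif step == "U":
--             path.append((path[-1][0]-1, path[-1][1]))
--         elif step == "D":
--             path.append((path[-1][0]+1, path[-1][1]))
--         elif step == "UL":
--             path.append((path[-1][0]-1, path[-1][1]-1))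
--         elif step == "UR":
--             path.append((path[-1][0]-1, path[-1][1]+1))
--         elif step == "DL":
--             path.append((path[-1][0]+1, path[-1][1]-1))
--         elif step == "DR":
--             path.append((path[-1][0]+1, path[-1][1]+1))
--
--     return path
-- ===== SOURCE B (Python) =====
-- _DELTAS = {"L": (0, -1), "R": (0, 1), "U": (-1, 0), "D": (1, 0),
--            "UL": (-1, -1), "UR": (-1, 1), "DL": (1, -1), "DR": (1, 1)}
--
-- def convert_steps_to_path(steps):
--     # staged passes: filter steps to deltas, prefix-sum each coordinate axis
--     # in its own independent pass, then zip the two axes back into points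
--     deltas = [_DELTAS[s] for s in steps if s in _DELTAS]
--     rows = [0]
--     for d in deltas:
--         rows.append(rows[-1] + d[0])
--     cols = [0]
--     for d in deltas:
--         cols.append(cols[-1] + d[1])
--     return list(zip(rows, cols))
-- ===== Notes on version B (the rewrite author's own statement) =====
-- stated objective: alternative
-- what changed: Instead of A's single pass appending pairs via an 8-way branch chain reading path[-1], B filters the steps to a delta list via a table, then computes the row and column coordinates in two separate independent prefix-sum passes and zips the two axis lists back into the path.
import Mathlib
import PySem

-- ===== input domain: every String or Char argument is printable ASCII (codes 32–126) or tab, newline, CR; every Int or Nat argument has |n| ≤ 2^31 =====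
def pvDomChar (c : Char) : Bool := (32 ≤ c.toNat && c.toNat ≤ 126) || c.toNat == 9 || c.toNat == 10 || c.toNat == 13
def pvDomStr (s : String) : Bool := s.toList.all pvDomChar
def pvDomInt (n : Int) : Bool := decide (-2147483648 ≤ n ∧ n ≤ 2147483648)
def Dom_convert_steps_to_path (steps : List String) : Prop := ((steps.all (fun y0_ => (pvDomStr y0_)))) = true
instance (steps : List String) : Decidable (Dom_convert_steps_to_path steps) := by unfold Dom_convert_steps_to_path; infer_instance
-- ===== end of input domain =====

-- B replaces A's single pass of pair appends (8-way branch chain reading path[-1]) by staged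
-- passes: a table-driven filter to deltas, two independent per-axis prefix-sum passes, and a
-- final zip of the two axis lists (objective: alternative; same return value).


-- ===== PORT A =====
-- one iteration of A's loop: the if/elif chain, each branch appending relative to path[-1]
def pvStepA (path : List (Int × Int)) (step : String) : List (Int × Int) :=
  let last : Int × Int := (PySem.List.pyGet? path (-1)).getD (0, 0)  -- path[-1]; path is never empty here
  if step = "L" then path ++ [(last.1, last.2 - 1)]
  else if step = "R" then path ++ [(last.1, last.2 + 1)]
  else if step = "U" then path ++ [(last.1 - 1, last.2)]
  else if step = "D" then path ++ [(last.1 + 1, last.2)]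
  else if step = "UL" then path ++ [(last.1 - 1, last.2 - 1)]
  else if step = "UR" then path ++ [(last.1 - 1, last.2 + 1)]
  else if step = "DL" then path ++ [(last.1 + 1, last.2 - 1)]
  else if step = "DR" then path ++ [(last.1 + 1, last.2 + 1)]
  else path

def convert_steps_to_path (steps : List String) : List (Int × Int) :=
  steps.foldl pvStepA [(0, 0)]

-- ===== PORT B =====
-- B's module-level delta table _DELTAS
def pvDeltas : PySem.Dict String (Int × Int) :=
  PySem.Dict.mk [("L", (0, -1)), ("R", (0, 1)), ("U", (-1, 0)), ("D", (1, 0)),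
                     ("UL", (-1, -1)), ("UR", (-1, 1)), ("DL", (1, -1)), ("DR", (1, 1))]

-- one iteration of B's rows pass: rows.append(rows[-1] + d[0])
def pvRowStep (rows : List Int) (d : Int × Int) : List Int :=
  rows ++ [((PySem.List.pyGet? rows (-1)).getD 0) + d.1]

-- one iteration of B's cols pass: cols.append(cols[-1] + d[1])
def pvColStep (cols : List Int) (d : Int × Int) : List Int :=
  cols ++ [((PySem.List.pyGet? cols (-1)).getD 0) + d.2]

def convert_steps_to_path_alt (steps : List String) : List (Int × Int) :=
  let deltas := steps.filterMap (fun s => pvDeltas.get? s)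
  let rows := deltas.foldl pvRowStep [0]
  let cols := deltas.foldl pvColStep [0]
  rows.zip cols

-- ===== PRECONDITION & SPEC =====
def Spec_convert_steps_to_path (steps : List String) (out : List (Int × Int)) : Prop := out = convert_steps_to_path_alt steps
instance (steps : List String) (out : List (Int × Int)) : Decidable (Spec_convert_steps_to_path steps out) := by unfold Spec_convert_steps_to_path; infer_instance

-- ===== CLAIM (what is proved, stated in full; the proofs are below) =====
def Claim_equal_convert_steps_to_path : Prop := ∀ (steps : List String), Dom_convert_steps_to_path steps → Spec_convert_steps_to_path steps (convert_steps_to_path steps)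

-- ===== LEMMAS AND PROOFS =====

-- abstract pair scan: the intended path for a list of deltas, starting at x
def pvPScan (x : Int × Int) : List (Int × Int) → List (Int × Int)
  | [] => [x]
  | d :: ds => x :: pvPScan (x.1 + d.1, x.2 + d.2) ds

-- abstract integer scan: one coordinate axis
def pvIScan (a : Int) : List Int → List Int
  | [] => [a]
  | d :: ds => a :: pvIScan (a + d) ds

-- the table lookup, spelled out as the same if-chain as A's branches
theorem pvDeltas_get? (s : String) :
    pvDeltas.get? s =
      if s = "L" then some (0, -1)
      else if s = "R" then some (0, 1)
      else if s = "U" then some (-1, 0)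
      else if s = "D" then some (1, 0)
      else if s = "UL" then some (-1, -1)
      else if s = "UR" then some (-1, 1)
      else if s = "DL" then some (1, -1)
      else if s = "DR" then some (1, 1)
      else none := by
  by_cases h1 : s = "L"; · subst h1; decide
  by_cases h2 : s = "R"; · subst h2; decide
  by_cases h3 : s = "U"; · subst h3; decide
  by_cases h4 : s = "D"; · subst h4; decide
  by_cases h5 : s = "UL"; · subst h5; decide
  by_cases h6 : s = "UR"; · subst h6; decide
  by_cases h7 : s = "DL"; · subst h7; decide
  by_cases h8 : s = "DR"; · subst h8; decide
  simp only [pvDeltas, PySem.Dict.get?, h1, h2, h3, h4, h5, h6, h7, h8]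
  simp
  exact ⟨fun h => h1 h.symm, fun h => h2 h.symm, fun h => h3 h.symm, fun h => h4 h.symm,
         fun h => h5 h.symm, fun h => h6 h.symm, fun h => h7 h.symm, fun h => h8 h.symm⟩

-- A's loop body, rewritten through the table
theorem pvStepA_eq (path : List (Int × Int)) (x : Int × Int) (s : String) :
    pvStepA (path ++ [x]) s =
      match pvDeltas.get? s with
      | some d => (path ++ [x]) ++ [(x.1 + d.1, x.2 + d.2)]
      | none => path ++ [x] := by
  unfold pvStepA
  rw [pvDeltas_get?, PySem.List.pyGet?_neg_one_append_singleton]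
  split_ifs <;> simp <;> constructor <;> ring

-- A's fold over steps equals the abstract pair scan over the filtered deltas
theorem pvA_scan (steps : List String) (p : List (Int × Int)) (x : Int × Int) :
    steps.foldl pvStepA (p ++ [x]) =
      p ++ pvPScan x (steps.filterMap (fun s => pvDeltas.get? s)) := by
  induction steps generalizing p x with
  | nil => simp [pvPScan]
  | cons s rest ih =>
    simp only [List.foldl_cons, List.filterMap_cons, pvStepA_eq]
    cases h : pvDeltas.get? s with
    | none => exact ih p x
    | some d =>
      have := ih (p ++ [x]) (x.1 + d.1, x.2 + d.2)
      simpa [pvPScan, List.append_assoc] using this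

-- B's rows pass equals the abstract integer scan of the first components
theorem pvRows_scan (ds : List (Int × Int)) (q : List Int) (a : Int) :
    ds.foldl pvRowStep (q ++ [a]) = q ++ pvIScan a (ds.map Prod.fst) := by
  induction ds generalizing q a with
  | nil => simp [pvIScan]
  | cons d rest ih =>
    simp only [List.foldl_cons, List.map_cons, pvRowStep,
      PySem.List.pyGet?_neg_one_append_singleton, Option.getD_some]
    have := ih (q ++ [a]) (a + d.1)
    simpa [pvIScan, List.append_assoc] using this

-- B's cols pass equals the abstract integer scan of the second components
theorem pvCols_scan (ds : List (Int × Int)) (q : List Int) (a : Int) :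
    ds.foldl pvColStep (q ++ [a]) = q ++ pvIScan a (ds.map Prod.snd) := by
  induction ds generalizing q a with
  | nil => simp [pvIScan]
  | cons d rest ih =>
    simp only [List.foldl_cons, List.map_cons, pvColStep,
      PySem.List.pyGet?_neg_one_append_singleton, Option.getD_some]
    have := ih (q ++ [a]) (a + d.2)
    simpa [pvIScan, List.append_assoc] using this

-- zipping the two axis scans recovers the pair scan
theorem pvZip_scan (ds : List (Int × Int)) (a b : Int) :
    (pvIScan a (ds.map Prod.fst)).zip (pvIScan b (ds.map Prod.snd)) =
      pvPScan (a, b) ds := by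
  induction ds generalizing a b with
  | nil => simp [pvIScan, pvPScan]
  | cons d rest ih => simp [pvIScan, pvPScan, ih]

-- ===== VERDICT (by name: the statement is the Claim_ definition above) =====
theorem convert_steps_to_path_spec : Claim_equal_convert_steps_to_path := by
  intro steps _
  unfold Spec_convert_steps_to_path convert_steps_to_path convert_steps_to_path_alt
  have hA := pvA_scan steps [] (0, 0)
  have hR := pvRows_scan (steps.filterMap (fun s => pvDeltas.get? s)) [] 0
  have hC := pvCols_scan (steps.filterMap (fun s => pvDeltas.get? s)) [] 0
  simp only [List.nil_append] at hA hR hC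
  show _ = (((steps.filterMap (fun s => pvDeltas.get? s)).foldl pvRowStep [0]).zip
      ((steps.filterMap (fun s => pvDeltas.get? s)).foldl pvColStep [0]))
  rw [hA, hR, hC, pvZip_scan]
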